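-- pv_equiv track=rewrite | github.com/C2A2-at-Florida-Atlantic-University/PHY-Key-Generation | AI/src/channelFingerprintg/RunRNNExperimentMatrix.py | validate_requested_gpu_ids
-- ===== SOURCE A (Python) =====
-- from typing import Any, Dict, List
--
-- def validate_requested_gpu_ids(
--     discovered: List[Dict[str, Any]],
--     requested_ids: List[int],
-- ) -> tuple[List[int], List[int]]:
--     if not requested_ids:
--         return [], []
--     discovered_ids = {gpu["index"] for gpu in discovered}
--     valid_ids: List[int] = []
--     invalid_ids: List[int] = []
--     seen_ids: set[int] = set()
--     for gpu_id in requested_ids: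
--         if gpu_id in seen_ids:
--             continue
--         seen_ids.add(gpu_id)
--         if gpu_id in discovered_ids:
--             valid_ids.append(gpu_id)
--         else:
--             invalid_ids.append(gpu_id)
--     return valid_ids, invalid_ids
-- ===== SOURCE B (Python) =====
-- from typing import Any, Dict, List
--
-- def validate_requested_gpu_ids(
--     discovered: List[Dict[str, Any]],
--     requested_ids: List[int],
-- ) -> tuple[List[int], List[int]]:
--     if not requested_ids:
--         return [], []
--     discovered_ids = {gpu["index"] for gpu in discovered}
--     valid_ids: List[int] = []
--     invalid_ids: List[int] = []
--     # Worklist with duplicate removal: classify the first pending id, then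
--     # delete every later occurrence of it from the worklist.  No seen-set.
--     pending = requested_ids
--     while pending:
--         head = pending[0]
--         if head in discovered_ids:
--             valid_ids.append(head)
--         else:
--             invalid_ids.append(head)
--         pending = [y for y in pending[1:] if y != head]
--     return valid_ids, invalid_ids
-- ===== Notes on version B (the rewrite author's own statement) =====
-- stated objective: alternative
-- what changed: Replaces A's single pass with a seen-set by a worklist algorithm that keeps no seen-set at all: it classifies the first pending id and then deletes all of its later occurrences from the worklist by filtering, repeating until the worklist is empty.
import Mathlib
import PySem

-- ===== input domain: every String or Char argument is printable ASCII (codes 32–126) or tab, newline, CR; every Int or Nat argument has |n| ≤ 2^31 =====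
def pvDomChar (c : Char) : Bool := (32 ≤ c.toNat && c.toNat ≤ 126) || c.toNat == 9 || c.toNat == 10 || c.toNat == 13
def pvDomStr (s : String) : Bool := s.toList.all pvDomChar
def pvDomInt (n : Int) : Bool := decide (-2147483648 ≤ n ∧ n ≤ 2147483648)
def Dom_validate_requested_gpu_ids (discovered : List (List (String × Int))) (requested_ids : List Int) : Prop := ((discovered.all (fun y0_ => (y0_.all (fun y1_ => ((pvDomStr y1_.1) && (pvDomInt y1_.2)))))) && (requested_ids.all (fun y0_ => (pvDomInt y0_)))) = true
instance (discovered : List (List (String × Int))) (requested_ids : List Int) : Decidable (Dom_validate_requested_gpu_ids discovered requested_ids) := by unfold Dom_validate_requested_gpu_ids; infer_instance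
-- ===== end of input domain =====

-- B replaces A's single pass with a seen-set by a worklist algorithm with no seen-set:
-- classify the first pending id and delete its later occurrences from the worklist; objective: alternative.

-- ===== PORT A =====
-- gpu["index"]: first-match lookup in the association list; total form with default 0,
-- exact under Pre_ (which guarantees the key is present wherever it is looked up).
def pvGetIndex (d : List (String × Int)) : Int := (d.lookup "index").getD 0

def validate_requested_gpu_ids (discovered : List (List (String × Int))) (requested_ids : List Int) : List Int × List Int :=
  if requested_ids = [] then ([], [])
  else
    let discovered_ids : PySem.Set Int :=
      discovered.foldl (fun s g => PySem.Set.add s (pvGetIndex g)) PySem.Set.empty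
    let r := requested_ids.foldl
      (fun (st : List Int × List Int × PySem.Set Int) gpu_id =>
        if PySem.Set.contains st.2.2 gpu_id then st
        else if PySem.Set.contains discovered_ids gpu_id then
          (st.1 ++ [gpu_id], st.2.1, PySem.Set.add st.2.2 gpu_id)
        else (st.1, st.2.1 ++ [gpu_id], PySem.Set.add st.2.2 gpu_id))
      ([], [], PySem.Set.empty)
    (r.1, r.2.1)

-- ===== PORT B =====
-- the 'while pending:' worklist loop of Source B, transliterated as recursion on the
-- worklist (each step classifies the head and filters it out of the tail)
def pvWorklist (discovered_ids : PySem.Set Int) (valid_ids invalid_ids : List Int) : List Int → List Int × List Int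
  | [] => (valid_ids, invalid_ids)
  | head :: rest =>
    if PySem.Set.contains discovered_ids head then
      pvWorklist discovered_ids (valid_ids ++ [head]) invalid_ids (rest.filter (fun y => y ≠ head))
    else
      pvWorklist discovered_ids valid_ids (invalid_ids ++ [head]) (rest.filter (fun y => y ≠ head))
termination_by pending => pending.length
decreasing_by
  all_goals
    simp only [List.length_unattach]
    exact Nat.lt_succ_of_le (le_trans (List.length_filter_le _ _) (by simp))

def validate_requested_gpu_ids_alt (discovered : List (List (String × Int))) (requested_ids : List Int) : List Int × List Int :=
  if requested_ids = [] then ([], [])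
  else
    let discovered_ids : PySem.Set Int := PySem.Set.ofList (discovered.map pvGetIndex)
    pvWorklist discovered_ids [] [] requested_ids

-- ===== PRECONDITION & SPEC =====
-- Pre_ excludes exactly the inputs where the Python raises KeyError: requested_ids nonempty while
-- some discovered dict lacks the "index" key (both A and B raise there; when requested_ids is
-- empty neither program touches discovered).
def Pre_validate_requested_gpu_ids (discovered : List (List (String × Int))) (requested_ids : List Int) : Prop :=
  requested_ids = [] ∨ ∀ g ∈ discovered, (g.lookup "index").isSome
instance (discovered : List (List (String × Int))) (requested_ids : List Int) : Decidable (Pre_validate_requested_gpu_ids discovered requested_ids) := by unfold Pre_validate_requested_gpu_ids; infer_instance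
def pvWitness_validate_requested_gpu_ids : (List (List (String × Int))) × List Int := ([[("index", 0)], [("index", 2)]], [2, 5, 2, 0])
def Spec_validate_requested_gpu_ids (discovered : List (List (String × Int))) (requested_ids : List Int) (out : List Int × List Int) : Prop := out = validate_requested_gpu_ids_alt discovered requested_ids
instance (discovered : List (List (String × Int))) (requested_ids : List Int) (out : List Int × List Int) : Decidable (Spec_validate_requested_gpu_ids discovered requested_ids out) := by unfold Spec_validate_requested_gpu_ids; infer_instance

-- ===== CLAIM (what is proved, stated in full; the proofs are below) =====
def Claim_equal_validate_requested_gpu_ids : Prop := ∀ (discovered : List (List (String × Int))) (requested_ids : List Int), Dom_validate_requested_gpu_ids discovered requested_ids → Pre_validate_requested_gpu_ids discovered requested_ids → Spec_validate_requested_gpu_ids discovered requested_ids (validate_requested_gpu_ids discovered requested_ids)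

-- ===== LEMMAS AND PROOFS =====

-- the elements of xs not in the seen-set s, first occurrences, in order
def pvFresh (s : PySem.Set Int) : List Int → List Int
  | [] => []
  | x :: xs => if PySem.Set.contains s x then pvFresh s xs else x :: pvFresh (PySem.Set.add s x) xs

theorem pvContains_add (s : PySem.Set Int) (x z : Int) :
    PySem.Set.contains (PySem.Set.add s x) z = (PySem.Set.contains s z || decide (z = x)) := by
  simp [PySem.Set.contains, PySem.Set.mem_add, Bool.decide_or]

-- pvFresh depends on the seen-set only through membership
theorem pvFresh_congr (xs : List Int) : ∀ (s t : PySem.Set Int),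
    (∀ z, PySem.Set.contains s z = PySem.Set.contains t z) → pvFresh s xs = pvFresh t xs := by
  induction xs with
  | nil => intro s t _; rfl
  | cons x xs ih =>
    intro s t h
    simp only [pvFresh, h x]
    by_cases hx : PySem.Set.contains t x
    · rw [if_pos hx, if_pos hx]; exact ih s t h
    · rw [if_neg hx, if_neg hx]
      refine congrArg _ (ih _ _ ?_)
      intro z
      rw [pvContains_add, pvContains_add, h z]

-- marking x as seen = deleting x from the rest of the input
theorem pvFresh_add_eq_filter (xs : List Int) : ∀ (s : PySem.Set Int) (x : Int),
    pvFresh (PySem.Set.add s x) xs = pvFresh s (xs.filter (fun y => y ≠ x)) := by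
  induction xs with
  | nil => intro s x; rfl
  | cons y ys ih =>
    intro s x
    by_cases hyx : y = x
    · subst hyx
      have hc : PySem.Set.contains (PySem.Set.add s y) y = true := by
        rw [pvContains_add]; simp
      simp only [pvFresh]
      rw [if_pos hc, ih]
      simp
    · have hfil : (y :: ys).filter (fun z => z ≠ x) = y :: ys.filter (fun z => z ≠ x) := by
        simp [List.filter, hyx]
      rw [hfil]
      simp only [pvFresh]
      have hcs : PySem.Set.contains (PySem.Set.add s x) y = PySem.Set.contains s y := by
        rw [pvContains_add]; simp [hyx]
      rw [hcs]
      by_cases hy : PySem.Set.contains s y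
      · rw [if_pos hy, if_pos hy]; exact ih s x
      · rw [if_neg hy, if_neg hy]
        refine congrArg _ ?_
        calc pvFresh (PySem.Set.add (PySem.Set.add s x) y) ys
            = pvFresh (PySem.Set.add (PySem.Set.add s y) x) ys := by
              refine pvFresh_congr ys _ _ ?_
              intro z
              simp only [pvContains_add]
              cases PySem.Set.contains s z <;> simp [Bool.or_comm]
          _ = pvFresh (PySem.Set.add s y) (ys.filter (fun z => z ≠ x)) := ih _ x

-- A's fused loop = fresh elements split by membership
theorem pvLoopA_eq (p : Int → Bool) (xs : List Int) :
    ∀ (v i : List Int) (s : PySem.Set Int),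
      xs.foldl
        (fun (st : List Int × List Int × PySem.Set Int) gpu_id =>
          if PySem.Set.contains st.2.2 gpu_id then st
          else if p gpu_id then (st.1 ++ [gpu_id], st.2.1, PySem.Set.add st.2.2 gpu_id)
          else (st.1, st.2.1 ++ [gpu_id], PySem.Set.add st.2.2 gpu_id))
        (v, i, s)
      = (v ++ (pvFresh s xs).filter p,
         i ++ (pvFresh s xs).filter (fun x => !p x),
         xs.foldl PySem.Set.add s) := by
  induction xs with
  | nil => intro v i s; simp only [List.foldl_nil, pvFresh]; simp
  | cons x xs ih =>
    intro v i s
    rw [List.foldl_cons, List.foldl_cons]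
    simp only [pvFresh]
    by_cases hs : PySem.Set.contains s x
    · have hm : x ∈ s := by simpa using hs
      have hadd : PySem.Set.add s x = s := by simp [PySem.Set.add, hm]
      simpa [hs, hm, hadd] using ih v i s
    · by_cases hp : p x
      · have := ih (v ++ [x]) i (PySem.Set.add s x)
        simp only [hs, Bool.false_eq_true, if_false, hp, if_true] at this ⊢
        rw [this]
        simp [hp]
      · have := ih v (i ++ [x]) (PySem.Set.add s x)
        simp only [hs, Bool.false_eq_true, if_false, hp] at this ⊢
        rw [this]
        simp [hp]

-- B's worklist loop = fresh elements split by membership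
theorem pvWorklist_eq (d : PySem.Set Int) : ∀ (pending v i : List Int),
    pvWorklist d v i pending
      = (v ++ (pvFresh PySem.Set.empty pending).filter (fun x => PySem.Set.contains d x),
         i ++ (pvFresh PySem.Set.empty pending).filter (fun x => !PySem.Set.contains d x)) := by
  intro pending
  induction hn : pending.length using Nat.strong_induction_on generalizing pending with
  | _ n ih =>
    match pending with
    | [] => intro v i; simp only [pvWorklist, pvFresh]; simp
    | x :: xs =>
      intro v i
      have hfr : pvFresh PySem.Set.empty (x :: xs)
          = x :: pvFresh PySem.Set.empty (xs.filter (fun y => y ≠ x)) := by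
        simp only [pvFresh]
        rw [if_neg (by simp [PySem.Set.contains, PySem.Set.empty]), pvFresh_add_eq_filter]
      have hlen : (xs.filter (fun y => y ≠ x)).length < n := by
        subst hn; exact Nat.lt_succ_of_le (List.length_filter_le _ _)
      have ihx := ih _ hlen (xs.filter (fun y => y ≠ x)) rfl
      simp only [pvWorklist]
      by_cases hd : PySem.Set.contains d x
      · rw [if_pos hd, ihx, hfr]
        have hd' : x ∈ d := by simpa [PySem.Set.contains] using hd
        simp [hd']
      · rw [if_neg hd, ihx, hfr]
        have hd' : x ∉ d := by simpa [PySem.Set.contains] using hd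
        simp [hd']

-- ===== VERDICT (by name: the statement is the Claim_ definition above) =====
theorem validate_requested_gpu_ids_spec : Claim_equal_validate_requested_gpu_ids := by
  intro discovered requested_ids _ _
  unfold Spec_validate_requested_gpu_ids validate_requested_gpu_ids validate_requested_gpu_ids_alt
  by_cases h : requested_ids = []
  · simp [h]
  · rw [if_neg h, if_neg h]
    have hset : discovered.foldl (fun s g => PySem.Set.add s (pvGetIndex g)) PySem.Set.empty
        = PySem.Set.ofList (discovered.map pvGetIndex) := by
      rw [PySem.Set.ofList_eq_foldl, List.foldl_map]; rfl
    simp only [hset]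
    rw [pvLoopA_eq (fun x => PySem.Set.contains (PySem.Set.ofList (discovered.map pvGetIndex)) x)
        requested_ids [] [] PySem.Set.empty,
      pvWorklist_eq (PySem.Set.ofList (discovered.map pvGetIndex)) requested_ids [] []]
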